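-- pv_equiv track=rewrite | github.com/ronamir1/AI_EX_2 | multi_agents.py | get_num_adjacent
-- ===== SOURCE A (Python) =====
-- def get_num_adjacent(board):
--     """
--     Gets the number of equal adjacent tiles in board and the possible value of adding them
--     :param board: the current game board
--     """
--     num = 0
--     for i in range(len(board)):
--         for j in range(len(board)):
--             if i > 0:
--                 if board[i][j] == board[i - 1][j]:
--                     num += board[i][j] * 2
--             if i < len(board) - 1:
--                 if board[i][j] == board[i + 1][j]:
--                     num += board[i][j] * 2
--             if j > 0:
--                 if board[i][j] == board[i][j - 1]:
--                     num += board[i][j] * 2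
--             if j < len(board) - 1:
--                 if board[i][j] == board[i][j + 1]:
--                     num += board[i][j] * 2
--     return num
-- ===== SOURCE B (Python) =====
-- def get_num_adjacent(board):
--     """
--     Gets the number of equal adjacent tiles in board and the possible value of adding them
--     :param board: the current game board
--     """
--     n = len(board)
--     grid = [row[:n] for row in board]
--     cols = [list(c) for c in zip(*grid)]
--
--     def line_score(line):
--         return sum(a * 4 for a, b in zip(line, line[1:]) if a == b)
--
--     return sum(line_score(r) for r in grid) + sum(line_score(c) for c in cols)
-- ===== Notes on version B (the rewrite author's own statement) =====
-- stated objective: faster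
-- what changed: B drops A's indexed four-direction per-cell scan: it truncates the board to its n x n grid, scores each row's consecutive equal pairs via zip at weight 4 per undirected edge, then transposes with zip(*grid) and scores the columns the same way (index-free staged passes instead of per-cell neighbor indexing with weight 2 per endpoint).
import Mathlib
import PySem

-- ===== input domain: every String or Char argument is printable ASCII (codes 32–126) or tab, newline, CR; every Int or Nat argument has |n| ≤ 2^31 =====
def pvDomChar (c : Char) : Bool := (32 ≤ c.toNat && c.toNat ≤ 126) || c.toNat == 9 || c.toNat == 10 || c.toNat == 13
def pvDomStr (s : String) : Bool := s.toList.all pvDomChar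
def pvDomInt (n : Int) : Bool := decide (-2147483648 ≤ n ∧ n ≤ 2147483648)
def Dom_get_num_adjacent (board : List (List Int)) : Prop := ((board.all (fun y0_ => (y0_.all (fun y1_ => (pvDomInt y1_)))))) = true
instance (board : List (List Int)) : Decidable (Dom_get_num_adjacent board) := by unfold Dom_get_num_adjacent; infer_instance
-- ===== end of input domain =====

-- B is a staged, index-free re-decomposition: truncate to the n×n grid, score each row's
-- consecutive equal pairs (zip) at weight 4, then do the same on the transposed columns,
-- instead of A's per-cell four-direction indexed scan adding 2 per endpoint.

-- ===== PORT A =====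
-- board[i][j] for 0 ≤ i,j: Python indexing = getD (the default is never reached inside Pre_)
def pvAt (board : List (List Int)) (i j : Nat) : Int := (board.getD i []).getD j 0

-- literal transliteration of A: for i in range(n): for j in range(n): four directional checks
def get_num_adjacent (board : List (List Int)) : Int :=
  (List.range board.length).foldl (fun num i =>
    (List.range board.length).foldl (fun num j =>
      let num := if 0 < i then
        (if pvAt board i j = pvAt board (i-1) j then num + pvAt board i j * 2 else num) else num
      let num := if i < board.length - 1 then
        (if pvAt board i j = pvAt board (i+1) j then num + pvAt board i j * 2 else num) else num
      let num := if 0 < j then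
        (if pvAt board i j = pvAt board i (j-1) then num + pvAt board i j * 2 else num) else num
      let num := if j < board.length - 1 then
        (if pvAt board i j = pvAt board i (j+1) then num + pvAt board i j * 2 else num) else num
      num) num) 0

-- ===== PORT B =====
-- sum(a * 4 for a, b in zip(line, line[1:]) if a == b); line[1:] on a list = tail (exact)
def lineScore (line : List Int) : Int :=
  (((line.zip line.tail).filter (fun p => p.1 == p.2)).map (fun p => p.1 * 4)).sum

-- hand port of Python's zip(*rows): emit the heads while every row is nonempty, i.e. truncate
-- at the shortest row (exact zip semantics); the fuel is the first row's length, which bounds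
-- the number of emitted tuples, so the recursion is structural on the fuel
def pyZipTAux : Nat → List (List Int) → List (List Int)
  | 0, _ => []
  | fuel + 1, rows =>
    if rows.all (fun r => !r.isEmpty) then
      (rows.map (fun r => r.headD 0)) :: pyZipTAux fuel (rows.map (fun r => r.tail))
    else []

def pyZipT (rows : List (List Int)) : List (List Int) :=
  match rows with
  | [] => []
  | r :: rest => pyZipTAux r.length (r :: rest)

-- literal transliteration of B: truncate rows to n, row pass, column pass over the transpose
def get_num_adjacent_alt (board : List (List Int)) : Int :=
  ((board.map (fun row => row.take board.length)).map lineScore).sum   -- row[:n] = take n, n ≥ 0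
    + ((pyZipT (board.map (fun row => row.take board.length))).map lineScore).sum

-- ===== PRECONDITION & SPEC =====
-- Pre_ excludes exactly the boards on which Python A raises IndexError: boards with at least
-- two rows some of which is shorter than len(board) (for len(board) ≤ 1 nothing is indexed).
def Pre_get_num_adjacent (board : List (List Int)) : Prop :=
  board.length ≤ 1 ∨ ∀ r ∈ board, board.length ≤ r.length
instance (board : List (List Int)) : Decidable (Pre_get_num_adjacent board) := by
  unfold Pre_get_num_adjacent; infer_instance

def pvWitness_get_num_adjacent : List (List Int) := [[2, 2], [4, 2]]

def Spec_get_num_adjacent (board : List (List Int)) (out : Int) : Prop := out = get_num_adjacent_alt board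
instance (board : List (List Int)) (out : Int) : Decidable (Spec_get_num_adjacent board out) := by unfold Spec_get_num_adjacent; infer_instance

-- ===== CLAIM (what is proved, stated in full; the proofs are below) =====
def Claim_equal_get_num_adjacent : Prop := ∀ (board : List (List Int)), Dom_get_num_adjacent board → Pre_get_num_adjacent board → Spec_get_num_adjacent board (get_num_adjacent board)

-- ===== LEMMAS AND PROOFS =====

-- finite sum of g over 0..n-1, as a list sum
def S (n : Nat) (g : Nat → Int) : Int := ((List.range n).map g).sum

lemma S_succ (n : Nat) (g : Nat → Int) : S (n+1) g = S n g + g n := by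
  simp [S, List.range_succ]

lemma S_cons (n : Nat) (g : Nat → Int) : S (n+1) g = g 0 + S n (fun k => g (k+1)) := by
  simp [S, List.range_succ_eq_map, List.map_map, Function.comp_def]

lemma S_add (n : Nat) (g h : Nat → Int) :
    S n (fun i => g i + h i) = S n g + S n h := by
  induction n with
  | zero => rfl
  | succ m ih => rw [S_succ, S_succ, S_succ, ih]; ring

lemma S_congr (n : Nat) (g h : Nat → Int) (H : ∀ i, i < n → g i = h i) :
    S n g = S n h := by
  induction n with
  | zero => rfl
  | succ m ih =>
    rw [S_succ, S_succ, ih (fun i hi => H i (Nat.lt_succ_of_lt hi)), H m (Nat.lt_succ_self m)]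

lemma S_comm (n m : Nat) (h : Nat → Nat → Int) :
    S n (fun i => S m (fun j => h i j)) = S m (fun j => S n (fun i => h i j)) := by
  induction n with
  | zero => simp [S]
  | succ k ih =>
    rw [S_succ, ih, ← S_add]
    exact S_congr _ _ _ (fun j _ => by rw [S_succ])

lemma S_shift (n : Nat) (w : Nat → Int) :
    S n (fun i => if 0 < i then w (i-1) else 0) = S (n-1) w := by
  induction n with
  | zero => rfl
  | succ m ih =>
    rw [S_succ, ih]
    cases m with
    | zero => simp [S]
    | succ k =>
      simp only [Nat.add_sub_cancel]
      rw [S_succ, if_pos (Nat.succ_pos k)]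

lemma S_trunc (n : Nat) (w : Nat → Int) :
    S n (fun i => if i + 1 < n then w i else 0) = S (n-1) w := by
  cases n with
  | zero => rfl
  | succ m =>
    rw [S_succ, if_neg (by omega), add_zero]
    exact S_congr _ _ _ (fun i hi => by rw [if_pos (by omega)])

-- the 1-dimensional identity: per-endpoint weight-2 contributions = per-edge weight-4 contributions
lemma oneD (n : Nat) (g : Nat → Int) :
    S n (fun j => (if 0 < j ∧ g j = g (j-1) then g j * 2 else 0)
                + (if j + 1 < n ∧ g j = g (j+1) then g j * 2 else 0))
  = S (n-1) (fun k => if g k = g (k+1) then g k * 4 else 0) := by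
  rw [S_add]
  have hU : S n (fun j => if 0 < j ∧ g j = g (j-1) then g j * 2 else 0)
      = S (n-1) (fun k => if g (k+1) = g k then g (k+1) * 2 else 0) := by
    rw [← S_shift n (fun k => if g (k+1) = g k then g (k+1) * 2 else 0)]
    refine S_congr _ _ _ (fun j _ => ?_)
    cases j with
    | zero => simp
    | succ k => simp
  have hD : S n (fun j => if j + 1 < n ∧ g j = g (j+1) then g j * 2 else 0)
      = S (n-1) (fun k => if g k = g (k+1) then g k * 2 else 0) := by
    rw [← S_trunc n (fun k => if g k = g (k+1) then g k * 2 else 0)]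
    refine S_congr _ _ _ (fun j _ => ?_)
    by_cases h : j + 1 < n <;> simp [h]
  rw [hU, hD, ← S_add]
  refine S_congr _ _ _ (fun k _ => ?_)
  by_cases h1 : g (k+1) = g k
  · rw [if_pos h1, if_pos h1.symm, if_pos h1.symm, h1]; ring
  · rw [if_neg h1, if_neg (fun h => h1 h.symm), if_neg (fun h => h1 h.symm)]; ring

lemma foldl_ext (l : List Nat) (F : Int → Nat → Int) (g : Nat → Int) (s : Int)
    (H : ∀ a i, F a i = a + g i) : l.foldl F s = s + (l.map g).sum := by
  induction l generalizing s with
  | nil => simp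
  | cons x xs ih => simp [List.foldl_cons, H, ih, add_assoc]

lemma ite_ite_add (c1 c2 : Prop) [Decidable c1] [Decidable c2] (x t : Int) :
    (if c1 then (if c2 then x + t else x) else x) = x + (if c1 ∧ c2 then t else 0) := by
  split_ifs <;> simp_all

-- per-cell term of A
def cellA (board : List (List Int)) (n i j : Nat) : Int :=
  (if 0 < i ∧ pvAt board i j = pvAt board (i-1) j then pvAt board i j * 2 else 0)
  + (if i + 1 < n ∧ pvAt board i j = pvAt board (i+1) j then pvAt board i j * 2 else 0)
  + (if 0 < j ∧ pvAt board i j = pvAt board i (j-1) then pvAt board i j * 2 else 0)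
  + (if j + 1 < n ∧ pvAt board i j = pvAt board i (j+1) then pvAt board i j * 2 else 0)

-- the two edge sums (weight 4 per equal undirected edge)
def HB (board : List (List Int)) (n : Nat) : Int :=
  S n (fun i => S (n-1) (fun k =>
    if pvAt board i k = pvAt board i (k+1) then pvAt board i k * 4 else 0))
def VB (board : List (List Int)) (n : Nat) : Int :=
  S n (fun j => S (n-1) (fun k =>
    if pvAt board k j = pvAt board (k+1) j then pvAt board k j * 4 else 0))

lemma A_eq (board : List (List Int)) :
    get_num_adjacent board
      = S board.length (fun i => S board.length (fun j => cellA board board.length i j)) := by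
  unfold get_num_adjacent
  rw [foldl_ext _ _ (fun i => S board.length (fun j => cellA board board.length i j)) 0
      (fun a i => ?_), zero_add]
  · rfl
  · rw [foldl_ext _ _ (fun j => cellA board board.length i j) a (fun b j => ?_)]
    · rfl
    · dsimp only
      simp only [ite_ite_add]
      unfold cellA
      have h1 : (i < board.length - 1) = (i + 1 < board.length) := by
        simp only [eq_iff_iff]; omega
      have h2 : (j < board.length - 1) = (j + 1 < board.length) := by
        simp only [eq_iff_iff]; omega
      simp only [h1, h2]
      ring

-- A's four-direction cell sum = the two undirected edge sums
lemma A_edges (board : List (List Int)) (n : Nat) :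
    S n (fun i => S n (fun j => cellA board n i j)) = HB board n + VB board n := by
  have hsplit : S n (fun i => S n (fun j => cellA board n i j))
      = S n (fun i => S n (fun j =>
          (if 0 < i ∧ pvAt board i j = pvAt board (i-1) j then pvAt board i j * 2 else 0)
          + (if i + 1 < n ∧ pvAt board i j = pvAt board (i+1) j then pvAt board i j * 2 else 0)))
      + S n (fun i => S n (fun j =>
          (if 0 < j ∧ pvAt board i j = pvAt board i (j-1) then pvAt board i j * 2 else 0)
          + (if j + 1 < n ∧ pvAt board i j = pvAt board i (j+1) then pvAt board i j * 2 else 0))) := by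
    rw [← S_add]
    refine S_congr _ _ _ (fun i _ => ?_)
    rw [← S_add]
    refine S_congr _ _ _ (fun j _ => ?_)
    unfold cellA; ring
  have hH : S n (fun i => S n (fun j =>
          (if 0 < j ∧ pvAt board i j = pvAt board i (j-1) then pvAt board i j * 2 else 0)
          + (if j + 1 < n ∧ pvAt board i j = pvAt board i (j+1) then pvAt board i j * 2 else 0)))
      = HB board n :=
    S_congr _ _ _ (fun i _ => oneD n (fun j => pvAt board i j))
  have hV : S n (fun i => S n (fun j =>
          (if 0 < i ∧ pvAt board i j = pvAt board (i-1) j then pvAt board i j * 2 else 0)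
          + (if i + 1 < n ∧ pvAt board i j = pvAt board (i+1) j then pvAt board i j * 2 else 0)))
      = VB board n := by
    rw [S_comm]
    exact S_congr _ _ _ (fun j _ => oneD n (fun i => pvAt board i j))
  rw [hsplit, hH, hV]; ring

-- lineScore as an indexed edge sum
lemma lineScore_eq (l : List Int) :
    lineScore l = S (l.length - 1) (fun k =>
      if l.getD k 0 = l.getD (k+1) 0 then l.getD k 0 * 4 else 0) := by
  induction l with
  | nil => rfl
  | cons a t ih =>
    cases t with
    | nil => rfl
    | cons b t' =>
      have hstep : lineScore (a :: b :: t')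
          = (if a = b then a * 4 else 0) + lineScore (b :: t') := by
        by_cases h : a = b <;> simp [lineScore, h]
      rw [hstep, ih]
      have hlen : (a :: b :: t').length - 1 = ((b :: t').length - 1) + 1 := by
        simp
      rw [hlen, S_cons]
      congr 1

-- sum of f over a list, indexed
lemma sum_map_getD {α : Type} (xs : List α) (f : α → Int) (d : α) :
    (xs.map f).sum = S xs.length (fun i => f (xs.getD i d)) := by
  induction xs with
  | nil => rfl
  | cons x t ih =>
    simp only [List.map_cons, List.sum_cons, List.length_cons]
    rw [S_cons, ih]
    simp

lemma getD_mem' {α : Type} (l : List α) (i : Nat) (d : α) (h : i < l.length) :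
    l.getD i d ∈ l := by
  rw [List.getD_eq_getElem _ _ h]; exact List.getElem_mem h

-- unfolding rule for pyZipT
lemma pyZipT_unfold (rows : List (List Int)) :
    pyZipT rows = if rows ≠ [] ∧ rows.all (fun r => !r.isEmpty) then
      (rows.map (fun r => r.headD 0)) :: pyZipT (rows.map (fun r => r.tail))
    else [] := by
  cases rows with
  | nil => simp [pyZipT]
  | cons r rest =>
    cases r with
    | nil => simp [pyZipT, pyZipTAux]
    | cons a t =>
      by_cases h : ((a :: t) :: rest).all (fun r => !r.isEmpty)
      · rw [if_pos ⟨List.cons_ne_nil _ _, h⟩]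
        show pyZipTAux (t.length + 1) ((a :: t) :: rest) = _
        rw [pyZipTAux, if_pos h]
        rfl
      · rw [if_neg (fun hc => h hc.2)]
        show pyZipTAux (t.length + 1) ((a :: t) :: rest) = _
        rw [pyZipTAux, if_neg h]

-- pyZipT on a rectangular nonempty grid is the column list
lemma pyZipT_rect (n : Nat) (grid : List (List Int)) (hne : grid ≠ [])
    (hrect : ∀ r ∈ grid, r.length = n) :
    pyZipT grid = (List.range n).map (fun j => grid.map (fun r => r.getD j 0)) := by
  induction n generalizing grid with
  | zero =>
    rw [pyZipT_unfold, if_neg]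
    · simp
    · rintro ⟨h1, h2⟩
      cases grid with
      | nil => exact hne rfl
      | cons r rest =>
        simp only [List.all_cons, Bool.and_eq_true] at h2
        have hr0 := hrect r (List.mem_cons_self)
        have : r = [] := List.eq_nil_of_length_eq_zero hr0
        subst this
        simp at h2
  | succ m ih =>
    have hall : grid.all (fun r => !r.isEmpty) = true := by
      rw [List.all_eq_true]
      intro r hr
      have := hrect r hr
      cases r with
      | nil => simp at this
      | cons a t => simp
    rw [pyZipT_unfold, if_pos ⟨hne, hall⟩]
    have htne : grid.map (fun r => r.tail) ≠ [] := by
      intro h; exact hne (List.map_eq_nil_iff.mp h)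
    have htrect : ∀ r ∈ grid.map (fun r => r.tail), r.length = m := by
      intro r hr
      rcases List.mem_map.mp hr with ⟨s, hs, rfl⟩
      have := hrect s hs
      simp [List.length_tail, this]
    rw [ih (grid.map (fun r => r.tail)) htne htrect]
    rw [List.range_succ_eq_map, List.map_cons, List.map_map]
    congr 1
    · refine List.map_congr_left (fun r hr => ?_)
      have := hrect r hr
      cases r with
      | nil => simp at this
      | cons a t => simp
    · refine List.map_congr_left (fun j _ => ?_)
      simp only [Function.comp_def, List.map_map]
      refine List.map_congr_left (fun r hr => ?_)
      have := hrect r hr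
      cases r with
      | nil => simp at this
      | cons a t => simp

lemma getD_map_lt {α β : Type} (xs : List α) (f : α → β) (k : Nat)
    (h : k < xs.length) (d : α) (d' : β) :
    (xs.map f).getD k d' = f (xs.getD k d) := by
  rw [List.getD_eq_getElem _ _ (by simpa using h), List.getD_eq_getElem _ _ h,
    List.getElem_map]

-- B as the two edge sums, under rectangularity
lemma B_eq (board : List (List Int)) (hrect : ∀ r ∈ board, board.length ≤ r.length) :
    get_num_adjacent_alt board = HB board board.length + VB board board.length := by
  set n := board.length with hn
  set grid := board.map (fun row => row.take board.length) with hgrid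
  have hgl : grid.length = n := by simp [hgrid, hn]
  have hrl : ∀ r ∈ grid, r.length = n := by
    intro r hr
    rcases List.mem_map.mp hr with ⟨s, hs, rfl⟩
    have := hrect s hs
    rw [List.length_take]
    omega
  have hpv : ∀ i j, i < n → j < n → (grid.getD i []).getD j 0 = pvAt board i j := by
    intro i j hi hj
    have hbl : i < board.length := by omega
    have hrow : grid.getD i [] = (board.getD i []).take board.length := by
      rw [hgrid]; exact getD_map_lt board _ i hbl [] []
    have hmem : board.getD i [] ∈ board := getD_mem' board i [] hbl
    have hlen : n ≤ (board.getD i []).length := hrect _ hmem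
    rw [hrow]
    unfold pvAt
    have hjl : j < (board.getD i []).length := by omega
    rw [List.getD_eq_getElem _ _ (by rw [List.length_take]; omega),
      List.getD_eq_getElem _ _ hjl, List.getElem_take]
  have hrows : (grid.map lineScore).sum = HB board n := by
    rw [sum_map_getD _ _ [], hgl]
    unfold HB
    refine S_congr _ _ _ (fun i hi => ?_)
    have hil : i < grid.length := by omega
    rw [lineScore_eq, hrl _ (getD_mem' grid i [] hil)]
    refine S_congr _ _ _ (fun k hk => ?_)
    rw [hpv i k hi (by omega), hpv i (k+1) hi (by omega)]
  have hcols : ((pyZipT grid).map lineScore).sum = VB board n := by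
    cases hnz : n with
    | zero =>
      have : board = [] := List.eq_nil_of_length_eq_zero (by omega)
      subst this
      rfl
    | succ m =>
      have hne : grid ≠ [] := by
        intro h
        rw [h] at hgl
        simp at hgl
        omega
      rw [← hnz] at *
      rw [pyZipT_rect n grid hne hrl, List.map_map]
      unfold VB S
      refine congrArg List.sum (List.map_congr_left (fun j hj => ?_)) 
      have hjn : j < n := List.mem_range.mp hj
      simp only [Function.comp_def]
      have hcl : (grid.map (fun r => r.getD j 0)).length = n := by simp [hgl]
      rw [lineScore_eq, hcl]
      refine S_congr _ _ _ (fun k hk => ?_)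
      rw [getD_map_lt grid _ k (by omega) [] 0, getD_map_lt grid _ (k+1) (by omega) [] 0,
        hpv k j (by omega) hjn, hpv (k+1) j (by omega) hjn]
  unfold get_num_adjacent_alt
  rw [← hgrid, hrows, hcols]

-- ===== VERDICT (by name: the statement is the Claim_ definition above) =====
theorem get_num_adjacent_spec : Claim_equal_get_num_adjacent := by
  intro board _ hpre
  unfold Spec_get_num_adjacent
  by_cases hrect : ∀ r ∈ board, board.length ≤ r.length
  · rw [A_eq, A_edges, B_eq board hrect]
  · have hle : board.length ≤ 1 := hpre.resolve_right hrect
    match board, hle with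
    | [], _ => rfl
    | [r], _ =>
      have : ¬ (1 ≤ r.length) := by
        intro h
        exact hrect (fun s hs => by
          rcases List.mem_singleton.mp hs with rfl
          simpa using h)
      have hr : r = [] := by
        cases r with
        | nil => rfl
        | cons a t => exact absurd (by simp) this
      subst hr
      rfl
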